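-- pv_equiv track=rewrite | github.com/pypi-data/pypi-mirror-72 | packages/range-digit/range-digit-0.0.1.tar.gz/range-digit-0.0.1/range_digit/__init__.py | change_digits
-- ===== SOURCE A (Python) =====
-- def change_digits(digits, num):
--     n = len(digits) - 1
--     digits[n] += num
--     while digits[n] < 0:
--         while digits[n] < 0:
--             digits[n] += 10
--             digits[n - 1] -= 1
--         n -= 1
--     return digits
-- ===== SOURCE B (Python) =====
-- def change_digits(digits, num):
--     # Single pass carrying the borrow in a local variable (one divmod per visited
--     # digit) instead of A's repeated +=10/-=1 writes; mutates digits in place and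
--     # returns it, like A.
--     i = len(digits) - 1
--     carry = num
--     while True:
--         v = digits[i] + carry
--         if v >= 0:
--             digits[i] = v
--             return digits
--         carry, digits[i] = divmod(v, 10)
--         i -= 1
-- ===== Notes on version B (the rewrite author's own statement) =====
-- stated objective: faster
-- what changed: B keeps the borrow in a local carry variable and does one divmod per visited digit in a single read-compute-write pass, instead of A's nested loops that repeatedly add 10 to digits[n] and decrement digits[n-1] once per unit of borrow.
-- outside the precondition, e.g. on change_digits([3], -50): A returns [7], B raises IndexError
import Mathlib
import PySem

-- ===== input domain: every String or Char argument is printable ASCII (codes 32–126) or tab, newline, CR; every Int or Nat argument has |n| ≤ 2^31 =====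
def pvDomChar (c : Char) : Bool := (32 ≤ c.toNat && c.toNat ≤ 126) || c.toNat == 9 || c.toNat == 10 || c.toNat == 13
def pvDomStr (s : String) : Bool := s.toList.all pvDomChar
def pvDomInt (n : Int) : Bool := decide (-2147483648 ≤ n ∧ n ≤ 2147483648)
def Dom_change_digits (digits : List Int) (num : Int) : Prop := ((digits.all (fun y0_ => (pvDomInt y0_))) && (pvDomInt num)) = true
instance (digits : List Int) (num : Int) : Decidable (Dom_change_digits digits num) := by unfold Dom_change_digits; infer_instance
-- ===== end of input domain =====

-- B replaces A's nested loops (repeated +=10 / -=1 writes, once per unit of borrow) by a single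
-- pass that keeps the borrow in a local carry variable, one divmod per visited digit. Both A and
-- B mutate `digits` in place in Python and return it — the theorems here are about the return
-- value (A and B perform the same net mutations).
-- Loops are ported with a structural fuel guard that only makes them total: A's inner loop raises
-- digits[n] by at least 9 per pass, so (-v).toNat + 1 passes suffice; each outer/B pass moves the
-- index down by 1 and Python raises IndexError below -len, so 2*len + 2 passes always suffice —
-- the guards never fire where the Python returns or raises.

-- ===== PORT A =====
-- one pass of A's inner loop body:  digits[n] += 10; digits[n-1] -= 1  (then re-read digits[n]);
-- none = IndexError.  Also covers the aliasing case n ~ n-1 of a one-element list.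
def pv_stepA (digits : List Int) (n v : Int) : Option (List Int × Int) :=
  (PySem.List.pySet? digits n (v + 10)).bind fun d1 =>
    (PySem.List.pyGet? d1 (n - 1)).bind fun w =>
      (PySem.List.pySet? d1 (n - 1) (w - 1)).bind fun d2 =>
        (PySem.List.pyGet? d2 n).map fun v' => (d2, v')

-- inner while-loop of A:  while digits[n] < 0: digits[n] += 10; digits[n-1] -= 1
def change_digits_inner : Nat → List Int → Int → Int → Option (List Int)
  | 0, _, _, _ => none                           -- fuel guard, never reached
  | fuel + 1, digits, n, v =>
    if v < 0 then
      match pv_stepA digits n v with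
      | none => none                             -- IndexError
      | some dv => change_digits_inner fuel dv.1 n dv.2
    else some digits

-- outer while-loop of A
def change_digits_go : Nat → List Int → Int → List Int
  | 0, _, _ => []                                -- fuel guard, never reached
  | fuel + 1, digits, n =>
    match PySem.List.pyGet? digits n with
    | none => []                                 -- IndexError
    | some v =>
      if v < 0 then
        match change_digits_inner ((-v).toNat + 1) digits n v with
        | none => []                             -- IndexError inside the inner loop
        | some d2 => change_digits_go fuel d2 (n - 1)
      else digits

def change_digits (digits : List Int) (num : Int) : List Int :=
  let n : Int := (digits.length : Int) - 1
  match PySem.List.pyGet? digits n with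
  | none => []                                   -- IndexError on empty digits
  | some v =>
    match PySem.List.pySet? digits n (v + num) with
    | none => []
    | some d1 => change_digits_go (2 * digits.length + 2) d1 n

-- ===== PORT B =====
-- B's single loop: v = digits[i] + carry; if v >= 0: digits[i] = v; return digits;
-- carry, digits[i] = divmod(v, 10); i -= 1
def change_digits_alt_go : Nat → List Int → Int → Int → List Int
  | 0, _, _, _ => []                             -- fuel guard, never reached
  | fuel + 1, digits, i, carry =>
    match PySem.List.pyGet? digits i with
    | none => []                                 -- IndexError
    | some d =>
      if 0 ≤ d + carry then
        match PySem.List.pySet? digits i (d + carry) with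
        | none => []
        | some d2 => d2
      else
        match PySem.List.pySet? digits i (PySem.Int.mod (d + carry) 10) with
        | none => []
        | some d2 => change_digits_alt_go fuel d2 (i - 1) (PySem.Int.floordiv (d + carry) 10)

def change_digits_alt (digits : List Int) (num : Int) : List Int :=
  change_digits_alt_go (2 * digits.length + 2) digits ((digits.length : Int) - 1) num

-- ===== PRECONDITION & SPEC =====
-- Closed-form arithmetic on the input (base-10 suffix values and their carries).
def pv_sufval (l : List Int) : Int := l.foldl (fun a d => 10 * a + d) 0

-- S j = num + value of the digit suffix starting at j (the quantity A's borrow chain conserves).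
def pv_S (digits : List Int) (num : Int) (j : Nat) : Int := num + pv_sufval (digits.drop j)

-- T j: the same quantity for the second, wrapped-around pass that Python's negative indexing
-- produces when the borrow passes the leading digit.
def pv_T (digits : List Int) (num : Int) (j : Nat) : Int :=
  let m := digits.length
  let c : Nat → Int := fun i => PySem.Int.floordiv (pv_S digits num i) (10 ^ (m - 1 - i))
  let d2 := (List.range m).map (fun i => PySem.Int.mod (c i) 10)
  PySem.Int.floordiv (PySem.Int.floordiv (c 0) 10 + pv_sufval (d2.drop j)) (10 ^ (m - 1 - j))

-- Pre_ = exactly the inputs on which the Python A returns normally (A raises IndexError on [] and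
-- whenever the borrow chain survives both the normal pass — all S j < 0 — and the wrapped-around
-- pass — all T j < 0), except that Pre_ also excludes one-element lists with digits[0] + num < 0:
-- there A's `digits[n] += 10; digits[-1] -= 1` hits the SAME cell (net +9 per step) and A returns
-- an accidental value, while B (one divmod per digit) raises IndexError.
def Pre_change_digits (digits : List Int) (num : Int) : Prop :=
  digits ≠ [] ∧
    (if digits.length = 1 then 0 ≤ digits.headD 0 + num
     else (∃ j < digits.length, 0 ≤ pv_S digits num j) ∨ (∃ j < digits.length, 0 ≤ pv_T digits num j))
instance (digits : List Int) (num : Int) : Decidable (Pre_change_digits digits num) := by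
  unfold Pre_change_digits; infer_instance

def pvWitness_change_digits : List Int × Int := ([1, 2], -3)

def Spec_change_digits (digits : List Int) (num : Int) (out : List Int) : Prop := out = change_digits_alt digits num
instance (digits : List Int) (num : Int) (out : List Int) : Decidable (Spec_change_digits digits num out) := by unfold Spec_change_digits; infer_instance

-- ===== CLAIM (what is proved, stated in full; the proofs are below) =====
def Claim_equal_change_digits : Prop := ∀ (digits : List Int) (num : Int), Dom_change_digits digits num → Pre_change_digits digits num → Spec_change_digits digits num (change_digits digits num)

-- ===== LEMMAS AND PROOFS =====

-- proof-side closed form of A's inner loop (one whole borrow step):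
-- digits[n] := (digits[n]) mod 10 and digits[n-1] += (digits[n]) fdiv 10; none = IndexError
def pv_borrow (digits : List Int) (n v : Int) : Option (List Int) :=
  (PySem.List.pySet? digits n (PySem.Int.mod v 10)).bind fun d1 =>
    (PySem.List.pyGet? d1 (n - 1)).bind fun w =>
      PySem.List.pySet? d1 (n - 1) (w + PySem.Int.floordiv v 10)

theorem pv_pyIdx?_facts {m : Nat} {i : Int} {k : Nat} (h : PySem.List.pyIdx? m i = some k) :
    k < m ∧ -(m : Int) ≤ i ∧ i < m := by
  unfold PySem.List.pyIdx? at h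
  split_ifs at h <;> simp_all <;> omega

theorem pv_get_some_idx {xs : List Int} {i : Int} {v : Int} (h : PySem.List.pyGet? xs i = some v) :
    ∃ k, PySem.List.pyIdx? xs.length i = some k ∧ xs[k]? = some v := by
  unfold PySem.List.pyGet? at h
  cases hk : PySem.List.pyIdx? xs.length i <;> rw [hk] at h
  · simp at h
  · exact ⟨_, rfl, h⟩

theorem pv_pySet?_eq {xs : List Int} {i : Int} {k : Nat}
    (h : PySem.List.pyIdx? xs.length i = some k) (x : Int) :
    PySem.List.pySet? xs i x = some (xs.set k x) := by
  unfold PySem.List.pySet?; rw [h]; rfl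

theorem pv_pyGet?_eq {xs : List Int} {i : Int} {k : Nat}
    (h : PySem.List.pyIdx? xs.length i = some k) :
    PySem.List.pyGet? xs i = xs[k]? := by
  unfold PySem.List.pyGet?; rw [h]; rfl

theorem pv_pyGet?_none {xs : List Int} {i : Int}
    (h : PySem.List.pyIdx? xs.length i = none) :
    PySem.List.pyGet? xs i = none := by
  unfold PySem.List.pyGet?; rw [h]; rfl

theorem pv_mod_add_ten (v : Int) : PySem.Int.mod (v + 10) 10 = PySem.Int.mod v 10 := by
  unfold PySem.Int.mod
  rw [Int.fmod_eq_emod, Int.fmod_eq_emod]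
  have ha : (v + 10) % 10 = v % 10 := by omega
  have hb : (10 : Int) ∣ v + 10 ↔ (10 : Int) ∣ v := by omega
  simp [ha, hb]

theorem pv_fdiv_add_ten (v : Int) : PySem.Int.floordiv (v + 10) 10 = PySem.Int.floordiv v 10 + 1 := by
  unfold PySem.Int.floordiv
  rw [Int.fdiv_eq_ediv, Int.fdiv_eq_ediv]
  have hb : (10 : Int) ∣ v + 10 ↔ (10 : Int) ∣ v := by omega
  simp [hb]
  omega

theorem pv_mod_last (v : Int) (h1 : v < 0) (h2 : 0 ≤ v + 10) :
    PySem.Int.mod v 10 = v + 10 ∧ PySem.Int.floordiv v 10 = -1 := by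
  unfold PySem.Int.mod PySem.Int.floordiv
  rw [Int.fmod_eq_emod, Int.fdiv_eq_ediv]
  simp
  omega

-- With at least two digits, Python indices n and n-1 never resolve to the same cell.
theorem pv_idx_ne {m : Nat} {n : Int} {k j : Nat} (hm : 2 ≤ m)
    (hk : PySem.List.pyIdx? m n = some k) (hj : PySem.List.pyIdx? m (n - 1) = some j) : k ≠ j := by
  unfold PySem.List.pyIdx? at hk hj
  split_ifs at hk hj <;> simp_all <;> omega

-- On a list of length ≥ 2 (so digits[n] and digits[n-1] are distinct cells), one pass of A's
-- inner loop body is: digits[n] gets +10, digits[n-1] gets -1, and the re-read value is v+10.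
theorem pv_stepA_char {digits : List Int} {n v : Int} {k j : Nat}
    (hm : 2 ≤ digits.length)
    (hk : PySem.List.pyIdx? digits.length n = some k)
    (hj : PySem.List.pyIdx? digits.length (n - 1) = some j) {w : Int}
    (hw : digits[j]? = some w) :
    pv_stepA digits n v = some (((digits.set k (v + 10)).set j (w - 1)), v + 10) := by
  have hkm := (pv_pyIdx?_facts hk).1
  have hjm := (pv_pyIdx?_facts hj).1
  have hkj : k ≠ j := pv_idx_ne hm hk hj
  unfold pv_stepA
  rw [pv_pySet?_eq hk, Option.bind_some]
  rw [pv_pyGet?_eq (show PySem.List.pyIdx? (digits.set k (v + 10)).length (n - 1) = some j by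
      simpa using hj), List.getElem?_set_ne hkj, hw, Option.bind_some]
  rw [pv_pySet?_eq (show PySem.List.pyIdx? (digits.set k (v + 10)).length (n - 1) = some j by
      simpa using hj), Option.bind_some]
  rw [pv_pyGet?_eq (show PySem.List.pyIdx? ((digits.set k (v + 10)).set j (w - 1)).length n = some k by
      simpa using hk), List.getElem?_set_ne (Ne.symm hkj),
    List.getElem?_set_self (by simpa using hkm)]
  rfl

-- A's inner loop, on a list of length ≥ 2 and with enough fuel, is exactly one divmod borrow step.
theorem pv_inner_char {n : Int} : ∀ (fuel : Nat) {digits : List Int} {v : Int},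
    (-v).toNat < fuel → 2 ≤ digits.length → PySem.List.pyGet? digits n = some v → v < 0 →
    change_digits_inner fuel digits n v = pv_borrow digits n v := by
  intro fuel
  induction fuel with
  | zero => intro digits v hf _ _ hv; omega
  | succ fuel ih =>
      intro digits v hf hm h0 hv
      obtain ⟨k, hk, hkv⟩ := pv_get_some_idx h0
      have hkm := (pv_pyIdx?_facts hk).1
      rw [change_digits_inner, if_pos hv]
      cases hj : PySem.List.pyIdx? digits.length (n - 1) with
      | none =>
          have hsA : pv_stepA digits n v = none := by
            unfold pv_stepA
            rw [pv_pySet?_eq hk, Option.bind_some,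
              pv_pyGet?_none (show PySem.List.pyIdx?
                (digits.set k (v + 10)).length (n - 1) = none by simpa using hj),
              Option.bind_none]
          rw [hsA]
          unfold pv_borrow
          rw [pv_pySet?_eq hk, Option.bind_some,
            pv_pyGet?_none (show PySem.List.pyIdx?
              (digits.set k (PySem.Int.mod v 10)).length (n - 1) = none by simpa using hj),
            Option.bind_none]
      | some j =>
          have hjm := (pv_pyIdx?_facts hj).1
          have hkj : k ≠ j := pv_idx_ne hm hk hj
          obtain ⟨w, hw⟩ : ∃ w, digits[j]? = some w := ⟨_, List.getElem?_eq_getElem hjm⟩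
          rw [pv_stepA_char hm hk hj hw]
          dsimp only
          by_cases hneg : v + 10 < 0
          · have hget2 : PySem.List.pyGet? ((digits.set k (v + 10)).set j (w - 1)) n =
                some (v + 10) := by
              rw [pv_pyGet?_eq (show PySem.List.pyIdx?
                  ((digits.set k (v + 10)).set j (w - 1)).length n = some k by simpa using hk),
                List.getElem?_set_ne (Ne.symm hkj), List.getElem?_set_self (by simpa using hkm)]
            rw [ih (by omega) (by simpa using hm) hget2 hneg]
            -- pv_borrow ((set k (v+10)).set j (w-1)) n (v+10) = pv_borrow digits n v
            unfold pv_borrow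
            rw [pv_pySet?_eq (show PySem.List.pyIdx?
                ((digits.set k (v + 10)).set j (w - 1)).length n = some k by simpa using hk),
              Option.bind_some, pv_mod_add_ten,
              List.set_comm _ _ hkj, List.set_set, List.set_comm _ _ (Ne.symm hkj)]
            rw [pv_pySet?_eq hk, Option.bind_some]
            rw [pv_pyGet?_eq (show PySem.List.pyIdx?
                (((digits.set k (PySem.Int.mod v 10)).set j (w - 1)).length) (n - 1) = some j by
                simpa using hj),
              List.getElem?_set_self (by simpa using hjm), Option.bind_some]
            rw [pv_pyGet?_eq (show PySem.List.pyIdx?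
                ((digits.set k (PySem.Int.mod v 10)).length) (n - 1) = some j by simpa using hj),
              List.getElem?_set_ne hkj, hw, Option.bind_some]
            rw [pv_fdiv_add_ten]
            rw [pv_pySet?_eq (show PySem.List.pyIdx?
                (((digits.set k (PySem.Int.mod v 10)).set j (w - 1)).length) (n - 1) = some j by
                simpa using hj)]
            rw [pv_pySet?_eq (show PySem.List.pyIdx?
                ((digits.set k (PySem.Int.mod v 10)).length) (n - 1) = some j by simpa using hj)]
            rw [List.set_set]
            have harith : w - 1 + (PySem.Int.floordiv v 10 + 1) = w + PySem.Int.floordiv v 10 := by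
              ring
            rw [harith]
          · cases fuel with
            | zero => omega
            | succ fuel' =>
                rw [change_digits_inner, if_neg hneg]
                obtain ⟨hmod, hfdiv⟩ := pv_mod_last v hv (by omega)
                unfold pv_borrow
                rw [hmod, hfdiv, pv_pySet?_eq hk, Option.bind_some]
                rw [pv_pyGet?_eq (show PySem.List.pyIdx?
                    ((digits.set k (v + 10)).length) (n - 1) = some j by simpa using hj),
                  List.getElem?_set_ne hkj, hw, Option.bind_some]
                rw [pv_pySet?_eq (show PySem.List.pyIdx?
                    ((digits.set k (v + 10)).length) (n - 1) = some j by simpa using hj)]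
                have harith : w + (-1 : Int) = w - 1 := by ring
                rw [harith]

-- The invariant relating the two loops on a list of length ≥ 2: at index n, A's list already
-- carries the borrow written into cell k = pyIdx n, while B keeps it in the carry variable.
theorem pv_go_eq : ∀ (fuel : Nat) (digits : List Int) (n carry : Int) (k : Nat) (d : Int),
    2 ≤ digits.length → PySem.List.pyIdx? digits.length n = some k → digits[k]? = some d →
    change_digits_go fuel (digits.set k (d + carry)) n = change_digits_alt_go fuel digits n carry := by
  intro fuel
  induction fuel with
  | zero => intro digits n carry k d _ _ _; rfl
  | succ fuel ih =>
      intro digits n carry k d hm hk hd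
      have hkm := (pv_pyIdx?_facts hk).1
      have hk' : PySem.List.pyIdx? (digits.set k (d + carry)).length n = some k := by simpa using hk
      have hgetA : PySem.List.pyGet? (digits.set k (d + carry)) n = some (d + carry) := by
        rw [pv_pyGet?_eq hk', List.getElem?_set_self (by simpa using hkm)]
      have hgetB : PySem.List.pyGet? digits n = some d := by rw [pv_pyGet?_eq hk, hd]
      rw [change_digits_go, change_digits_alt_go, hgetA, hgetB]
      dsimp only
      by_cases hv : d + carry < 0
      · rw [if_pos hv, if_neg (by omega)]
        rw [pv_inner_char ((-(d + carry)).toNat + 1) (by omega) (by simpa using hm) hgetA hv]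
        rw [pv_pySet?_eq hk]
        dsimp only
        unfold pv_borrow
        rw [pv_pySet?_eq hk', Option.bind_some, List.set_set]
        cases hj : PySem.List.pyIdx? digits.length (n - 1) with
        | none =>
            rw [pv_pyGet?_none (show PySem.List.pyIdx?
                (digits.set k (PySem.Int.mod (d + carry) 10)).length (n - 1) = none by
                simpa using hj), Option.bind_none]
            cases fuel with
            | zero => rfl
            | succ fuel' =>
                rw [change_digits_alt_go,
                  pv_pyGet?_none (show PySem.List.pyIdx?
                    (digits.set k (PySem.Int.mod (d + carry) 10)).length (n - 1) = none by
                    simpa using hj)]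
        | some j =>
            have hjm := (pv_pyIdx?_facts hj).1
            have hkj : k ≠ j := pv_idx_ne hm hk hj
            obtain ⟨w, hw⟩ : ∃ w, digits[j]? = some w := ⟨_, List.getElem?_eq_getElem hjm⟩
            have hw' : (digits.set k (PySem.Int.mod (d + carry) 10))[j]? = some w := by
              rw [List.getElem?_set_ne hkj, hw]
            rw [pv_pyGet?_eq (show PySem.List.pyIdx?
                (digits.set k (PySem.Int.mod (d + carry) 10)).length (n - 1) = some j by
                simpa using hj), hw', Option.bind_some]
            rw [pv_pySet?_eq (show PySem.List.pyIdx?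
                (digits.set k (PySem.Int.mod (d + carry) 10)).length (n - 1) = some j by
                simpa using hj)]
            dsimp only
            exact ih (digits.set k (PySem.Int.mod (d + carry) 10)) (n - 1)
              (PySem.Int.floordiv (d + carry) 10) j w (by simpa using hm)
              (by simpa using hj) hw'
      · rw [if_neg hv, if_pos (by omega), pv_pySet?_eq hk]

-- ===== VERDICT (by name: the statement is the Claim_ definition above) =====
theorem change_digits_spec : Claim_equal_change_digits := by
  intro digits num _ hpre
  unfold Spec_change_digits
  obtain ⟨hne, hrest⟩ := hpre
  have hm1 : 1 ≤ digits.length := by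
    cases digits with
    | nil => exact absurd rfl hne
    | cons a l => simp
  have hk : PySem.List.pyIdx? digits.length ((digits.length : Int) - 1) =
      some (digits.length - 1) := by
    unfold PySem.List.pyIdx?
    split_ifs <;> simp_all
  have hlt : digits.length - 1 < digits.length := by omega
  obtain ⟨v, hv⟩ : ∃ v, digits[digits.length - 1]? = some v :=
    ⟨_, List.getElem?_eq_getElem hlt⟩
  simp only [change_digits, change_digits_alt]
  rw [pv_pyGet?_eq hk, hv]
  dsimp only
  rw [pv_pySet?_eq hk]
  dsimp only
  by_cases h1 : digits.length = 1
  · rw [if_pos h1] at hrest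
    have hidx : digits.length - 1 = 0 := by omega
    rw [hidx] at hv hk hlt ⊢
    have hhead : digits.headD 0 = v := by
      cases digits with
      | nil => exact absurd rfl hne
      | cons a l =>
          simp only [List.getElem?_cons_zero, Option.some.injEq] at hv
          simpa using hv
    have h0v : 0 ≤ v + num := by rw [hhead] at hrest; exact hrest
    have hget1 : PySem.List.pyGet? (digits.set 0 (v + num))
        ((digits.length : Int) - 1) = some (v + num) := by
      rw [pv_pyGet?_eq (show PySem.List.pyIdx? (digits.set 0 (v + num)).length
          ((digits.length : Int) - 1) = some 0 by simpa using hk),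
        List.getElem?_set_self (by simpa using hlt)]
    have hgetB : PySem.List.pyGet? digits ((digits.length : Int) - 1) = some v := by
      rw [pv_pyGet?_eq hk, hv]
    obtain ⟨f, hf⟩ : ∃ f, 2 * digits.length + 2 = f + 1 := ⟨2 * digits.length + 1, rfl⟩
    rw [hf, change_digits_go, change_digits_alt_go, hget1, hgetB]
    dsimp only
    rw [if_neg (by omega), if_pos h0v, pv_pySet?_eq hk]
  · have hm2 : 2 ≤ digits.length := by omega
    exact pv_go_eq _ digits _ num _ v hm2 hk hv
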